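-- pv_equiv track=rewrite | github.com/vinchinzu/euler | python/388.py | compute_d_optimized
-- ===== SOURCE A (Python) =====
-- from math import isqrt
-- from typing import Dict, List
--
-- def _sieve_mobius(limit: int) -> List[int]:
--     """Compute Möbius function values mu[1..limit] using a linear sieve."""
--
--     mu = [0] * (limit + 1)
--     is_composite = [False] * (limit + 1)
--     primes: List[int] = []
--
--     mu[1] = 1
--     for i in range(2, limit + 1):
--         if not is_composite[i]:
--             primes.append(i)
--             mu[i] = -1
--         for p in primes:
--             v = p * i
--             if v > limit:
--                 break
--             is_composite[v] = True
--             if i % p == 0: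
--                 mu[v] = 0
--                 break
--             mu[v] = -mu[i]
--     return mu
--
-- def compute_mu_on_fly(d: int) -> int:
--     """Compute the Möbius function μ(d) via trial division.
--
--     This is used when d exceeds the pre-sieved range. It is not highly
--     optimized, but is sufficient for the usage pattern in this translation.
--     """
--
--     if d == 1:
--         return 1
--
--     factors: Dict[int, int] = {}
--     original_d = d
--     i = 2
--     while i * i <= d:
--         while d % i == 0:
--             factors[i] = factors.get(i, 0) + 1
--             d //= i
--         i += 1
--     if d > 1:
--         factors[d] = factors.get(d, 0) + 1
--
--     for exp in factors.values():
--         if exp >= 2: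
--             return 0
--
--     # μ(n) = (-1)^k for product of k distinct primes
--     return -1 if len(factors) % 2 == 1 else 1
--
-- def compute_d_optimized(n: int) -> int:
--     """Optimized computation of D(n) using improved constant-floor technique.
--
--     The formula computes sum_{d=1}^n mu(d) * (floor(n/d) + 1)^3 - M(n)
--     where M(n) is the Mertens function.
--     """
--
--     sqrt_n = isqrt(n)
--     # Sieve Möbius values up to a generous limit
--     sieve_limit = min(2 * 10**6, n)
--     mu = _sieve_mobius(sieve_limit)
--
--     # Precompute prefix sums for fast range queries
--     mu_prefix = [0] * (sieve_limit + 1)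
--     for i in range(1, sieve_limit + 1):
--         mu_prefix[i] = mu_prefix[i - 1] + mu[i]
--
--     main_sum = 0
--
--     # Direct computation for d <= sieve_limit
--     for d in range(1, min(sieve_limit, n) + 1):
--         k = n // d
--         main_sum += mu[d] * (k + 1) ** 3
--
--     # For d > sieve_limit, partition by constant floor(n/d)
--     if sieve_limit < n:
--         i = sieve_limit + 1
--         while i <= n:
--             k = n // i
--             j = n // k
--
--             # Sum mu(d) for d in [i, j] using on-the-fly computation
--             # Note: most large numbers have mu(d) = 0 due to square factors
--             for d in range(i, min(j, n) + 1):
--                 main_sum += compute_mu_on_fly(d) * (k + 1) ** 3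
--
--             i = j + 1
--
--     # Mertens M(n)
--     m_n = mu_prefix[min(sieve_limit, n)]
--     if sieve_limit < n:
--         for d in range(sieve_limit + 1, n + 1):
--             m_n += compute_mu_on_fly(d)
--
--     return main_sum - m_n
-- ===== SOURCE B (Python) =====
-- from math import isqrt
-- from typing import List
--
--
-- def _sieve_mobius(limit: int) -> List[int]:
--     """Compute Mobius function values mu[1..limit] using a linear sieve."""
--
--     mu = [0] * (limit + 1)
--     is_composite = [False] * (limit + 1)
--     primes: List[int] = []
--
--     mu[1] = 1
--     for i in range(2, limit + 1):
--         if not is_composite[i]: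
--             primes.append(i)
--             mu[i] = -1
--         for p in primes:
--             v = p * i
--             if v > limit:
--                 break
--             is_composite[v] = True
--             if i % p == 0:
--                 mu[v] = 0
--                 break
--             mu[v] = -mu[i]
--     return mu
--
--
-- def _mu_squarefree_sign(d: int) -> int:
--     """mu(d) by trial division: early exit on a repeated prime, sign accumulator."""
--     if d == 1:
--         return 1
--     sign = 1
--     i = 2
--     while i * i <= d:
--         if d % i == 0:
--             d //= i
--             if d % i == 0:
--                 return 0
--             sign = -sign
--         i += 1
--     return -sign if d > 1 else sign
--
--
-- def compute_d_optimized(n: int) -> int: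
--     # One fused pass: sum mu(d) * ((n//d + 1)**3 - 1), which equals
--     # sum mu(d) * (n//d + 1)**3  -  M(n); no prefix-sum array, no block loop.
--     sieve_limit = min(2 * 10**6, n)
--     mu = _sieve_mobius(sieve_limit)
--     total = 0
--     for d in range(1, n + 1):
--         m = mu[d] if d <= sieve_limit else _mu_squarefree_sign(d)
--         total += m * ((n // d + 1) ** 3 - 1)
--     return total
-- ===== Notes on version B (the rewrite author's own statement) =====
-- stated objective: simpler
-- what changed: B fuses A's four passes (prefix-sum array build, direct loop, constant-floor block loop, separate Mertens tail) into one single loop summing mu(d)*((n//d+1)^3-1), dropping the prefix array and the no-op blocking entirely, and computes mu for large d by a sign-accumulating trial division with early exit on a repeated prime instead of A's dict-of-exponents factorization.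
-- outside the precondition, e.g. on compute_d_optimized(0): A raises IndexError, B raises IndexError
import Mathlib
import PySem

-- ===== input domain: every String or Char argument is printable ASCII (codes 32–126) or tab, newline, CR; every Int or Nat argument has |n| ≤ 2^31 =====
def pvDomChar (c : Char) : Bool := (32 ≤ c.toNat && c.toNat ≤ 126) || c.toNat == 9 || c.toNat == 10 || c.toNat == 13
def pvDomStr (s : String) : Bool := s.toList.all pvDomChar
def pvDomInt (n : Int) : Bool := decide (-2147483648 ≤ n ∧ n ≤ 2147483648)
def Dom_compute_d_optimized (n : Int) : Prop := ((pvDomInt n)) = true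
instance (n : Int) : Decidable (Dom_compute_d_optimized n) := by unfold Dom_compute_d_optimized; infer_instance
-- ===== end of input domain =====

-- B fuses A's four passes (prefix array, direct loop, block loop, Mertens tail) into one
-- loop over d summing mu(d)*((n//d+1)^3-1), with a sign-accumulating trial division for
-- mu beyond the sieve limit (objective: simpler; return value only, nothing is mutated).

-- ===== PORT A =====
-- All list indices below are nonnegative and in range on every input admitted by
-- Pre_ (they are loop counters in [1, limit]), so `.set`/`.getD` are exact for
-- Python's mu[v] = … / mu[v] reads and writes.

-- inner `for p in primes` loop of the linear sieve (breaks ported as returns)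
def sieveInner (limit i : Int) (ps : List Int) (isC : List Bool) (mu : List Int) :
    List Bool × List Int :=
  match ps with
  | [] => (isC, mu)
  | p :: rest =>
    let v := p * i
    if limit < v then (isC, mu)
    else
      let isC' := isC.set v.toNat true
      if PySem.Int.mod i p = 0 then (isC', mu.set v.toNat 0)
      else sieveInner limit i rest isC' (mu.set v.toNat (-(mu.getD i.toNat 0)))

-- body of `for i in range(2, limit+1)`
def sieveStep (limit : Int) (st : List Int × List Bool × List Int) (i : Int) :
    List Int × List Bool × List Int :=
  let ps := st.1
  let isC := st.2.1
  let mu := st.2.2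
  let pm := if isC.getD i.toNat false then (ps, mu) else (ps ++ [i], mu.set i.toNat (-1))
  let r := sieveInner limit i pm.1 isC pm.2
  (pm.1, r.1, r.2)

-- _sieve_mobius(limit)
def sieveMobius (limit : Int) : List Int :=
  let mu0 := (List.replicate (limit + 1).toNat 0).set 1 1
  let isC0 := List.replicate (limit + 1).toNat false
  ((PySem.List.pyRange 2 (limit + 1) 1).foldl (sieveStep limit) ([], isC0, mu0)).2.2

-- termination helper for the trial-division loops (cited in decreasing_by)
theorem pvFloordivLe (d i : Int) (hd : 0 ≤ d) (hi : 0 < i) : PySem.Int.floordiv d i ≤ d := by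
  rw [PySem.Int.floordiv_eq_ediv_of_pos hi]
  exact Int.ediv_le_self i hd

theorem pvFloordivLtSelf (d i : Int) (hi : 2 ≤ i) (hd : 1 ≤ d) (hdvd : i ∣ d) :
    (PySem.Int.floordiv d i).toNat < d.toNat := by
  obtain ⟨e, he⟩ := hdvd
  have hipos : (0:Int) < i := by omega
  have hfe : PySem.Int.floordiv d i = e := by
    rw [PySem.Int.floordiv_eq_ediv_of_pos hipos, he]
    exact Int.mul_ediv_cancel_left e (by omega)
  have he1 : 1 ≤ e := by nlinarith
  have : e < d := by nlinarith
  omega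

-- inner `while d % i == 0` of compute_mu_on_fly: divides out i, counting into the dict
-- (the extra `2 ≤ i ∧ 1 ≤ d` guard conjuncts only make the recursion total; they hold
-- at every call site)
def muFlyInner (i d : Int) (f : PySem.Dict Int Int) : Int × PySem.Dict Int Int :=
  if h : 2 ≤ i ∧ 1 ≤ d ∧ PySem.Int.mod d i = 0 then
    muFlyInner i (PySem.Int.floordiv d i) (f.modify i 0 (· + 1))
  else (d, f)
termination_by d.toNat
decreasing_by
  exact pvFloordivLtSelf d i h.1 h.2.1 ((PySem.Int.mod_eq_zero_iff_dvd d i).1 h.2.2)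

theorem pvMuFlyInnerFstLe (i d : Int) (f : PySem.Dict Int Int) : (muFlyInner i d f).1 ≤ d := by
  induction d, f using muFlyInner.induct (i := i) with
  | case1 d f h ih =>
    rw [muFlyInner, dif_pos h]
    exact le_trans ih (pvFloordivLe d i (by omega) (by omega))
  | case2 d f h => rw [muFlyInner, dif_neg h]

-- outer `while i * i <= d` of compute_mu_on_fly
def muFlyOuter (i d : Int) (f : PySem.Dict Int Int) : Int × PySem.Dict Int Int :=
  if h : 2 ≤ i ∧ i * i ≤ d then
    let r := muFlyInner i d f
    muFlyOuter (i + 1) r.1 r.2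
  else (d, f)
termination_by (d - i).toNat
decreasing_by
  have h1 := pvMuFlyInnerFstLe i d f
  have h2 : 2 * i ≤ i * i := by nlinarith [h.1]
  omega

-- tail of compute_mu_on_fly: the `if d > 1` insertion and the final checks
def muFinish (r : Int × PySem.Dict Int Int) : Int :=
  let f := if 1 < r.1 then r.2.modify r.1 0 (· + 1) else r.2
  if f.values.any (fun e => decide (2 ≤ e)) then 0
  else if f.size % 2 = 1 then -1 else 1

def compute_mu_on_fly (d : Int) : Int :=
  if d = 1 then 1 else muFinish (muFlyOuter 2 d PySem.Dict.empty)

-- termination helper for the block loop: i ≤ n // (n // i) (cited in decreasing_by)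
theorem pvLeFdFd (n i : Int) (hi : 0 < i) (hin : i ≤ n) :
    i ≤ PySem.Int.floordiv n (PySem.Int.floordiv n i) := by
  have hk1 : 1 ≤ PySem.Int.floordiv n i := by
    rw [PySem.Int.le_floordiv_iff_mul_le hi]; omega
  rw [PySem.Int.le_floordiv_iff_mul_le (by omega)]
  have := (PySem.Int.le_floordiv_iff_mul_le (a := n) (b := i)
    (q := PySem.Int.floordiv n i) hi).1 le_rfl
  linarith [this]

-- `while i <= n` block loop of compute_d_optimized (the `1 ≤ i` conjunct only makes the
-- recursion total; it holds at the single call site since sieve_limit ≥ 1 under Pre_)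
def blockLoop (n i acc : Int) : Int :=
  if h : 1 ≤ i ∧ i ≤ n then
    let k := PySem.Int.floordiv n i
    let j := PySem.Int.floordiv n k
    let acc' := (PySem.List.pyRange i (min j n + 1) 1).foldl
        (fun a d => a + compute_mu_on_fly d * (k + 1) ^ 3) acc
    blockLoop n (j + 1) acc'
  else acc
termination_by (n + 1 - i).toNat
decreasing_by
  have := pvLeFdFd n i (by omega) h.2
  omega

-- compute_d_optimized(n); `sqrt_n = isqrt(n)` is dead code (n < 0, where it would
-- raise, is outside Pre_)
def compute_d_optimized (n : Int) : Int :=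
  let sieve_limit := min (2 * 10 ^ 6) n
  let mu := sieveMobius sieve_limit
  let mu_prefix := (PySem.List.pyRange 1 (sieve_limit + 1) 1).foldl
      (fun pre i => pre.set i.toNat (pre.getD (i - 1).toNat 0 + mu.getD i.toNat 0))
      (List.replicate (sieve_limit + 1).toNat 0)
  let main1 := (PySem.List.pyRange 1 (min sieve_limit n + 1) 1).foldl
      (fun acc d => acc + mu.getD d.toNat 0 * (PySem.Int.floordiv n d + 1) ^ 3) 0
  let main_sum := if sieve_limit < n then blockLoop n (sieve_limit + 1) main1 else main1
  let m1 := mu_prefix.getD (min sieve_limit n).toNat 0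
  let m_n := if sieve_limit < n then
      (PySem.List.pyRange (sieve_limit + 1) (n + 1) 1).foldl
        (fun acc d => acc + compute_mu_on_fly d) m1
    else m1
  main_sum - m_n

-- ===== PORT B =====
-- Source B's _sieve_mobius is character-for-character A's helper, so its port `sieveMobius`
-- (above) is shared.

-- `while i * i <= d` of _mu_squarefree_sign (guard conjunct `2 ≤ i` is for totality only)
def muTrialLoop (i d sign : Int) : Int :=
  if h : 2 ≤ i ∧ i * i ≤ d then
    if PySem.Int.mod d i = 0 then
      let d' := PySem.Int.floordiv d i
      if PySem.Int.mod d' i = 0 then 0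
      else muTrialLoop (i + 1) d' (-sign)
    else muTrialLoop (i + 1) d sign
  else if 1 < d then -sign else sign
termination_by (d - i).toNat
decreasing_by
  · have h1 : PySem.Int.floordiv d i ≤ d := pvFloordivLe d i (by nlinarith [h.1]) (by omega)
    have h2 : 2 * i ≤ i * i := by nlinarith [h.1]
    omega
  · have h2 : 2 * i ≤ i * i := by nlinarith [h.1]
    omega

def muSqfreeSign (d : Int) : Int :=
  if d = 1 then 1 else muTrialLoop 2 d 1

def compute_d_optimized_alt (n : Int) : Int :=
  let sieve_limit := min (2 * 10 ^ 6) n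
  let mu := sieveMobius sieve_limit
  (PySem.List.pyRange 1 (n + 1) 1).foldl
    (fun acc d =>
      let m := if d ≤ sieve_limit then mu.getD d.toNat 0 else muSqfreeSign d
      acc + m * ((PySem.Int.floordiv n d + 1) ^ 3 - 1)) 0

-- ===== PRECONDITION & SPEC =====
-- Pre_ excludes exactly n ≤ 0, where A raises (ValueError from isqrt for n < 0,
-- IndexError from mu[1] on the empty sieve for n = 0).
def Pre_compute_d_optimized (n : Int) : Prop := 1 ≤ n
instance (n : Int) : Decidable (Pre_compute_d_optimized n) := by
  unfold Pre_compute_d_optimized; infer_instance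

def pvWitness_compute_d_optimized : Int := 10

def Spec_compute_d_optimized (n : Int) (out : Int) : Prop := out = compute_d_optimized_alt n
instance (n : Int) (out : Int) : Decidable (Spec_compute_d_optimized n out) := by
  unfold Spec_compute_d_optimized; infer_instance

-- ===== CLAIM (what is proved, stated in full; the proofs are below) =====
def Claim_equal_compute_d_optimized : Prop :=
  ∀ (n : Int), Dom_compute_d_optimized n → Pre_compute_d_optimized n →
    Spec_compute_d_optimized n (compute_d_optimized n)

-- ===== LEMMAS AND PROOFS =====

-- generic sum lemma specific to the assembly of the two drivers
theorem pvSumMapSub (l : List Int) (f g : Int → Int) :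
    (l.map (fun d => f d - g d)).sum = (l.map f).sum - (l.map g).sum := by
  induction l with
  | nil => simp
  | cons x t ih => simp [ih]; ring

-- ---- floor-division facts used by the block loop ----

theorem pvFdPos (n i : Int) (hi : 0 < i) (hin : i ≤ n) : 1 ≤ PySem.Int.floordiv n i := by
  rw [PySem.Int.le_floordiv_iff_mul_le hi]; omega

theorem pvFdLeSelf (n k : Int) (hn : 0 ≤ n) (hk : 0 < k) : PySem.Int.floordiv n k ≤ n := by
  have := (PySem.Int.floordiv_lt_iff_lt_mul (a := n) (b := k) (q := n + 1) hk).2 (by nlinarith)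
  omega

theorem pvFdBlock (n i d : Int) (hi : 0 < i) (hin : i ≤ n) (hid : i ≤ d)
    (hd : d ≤ PySem.Int.floordiv n (PySem.Int.floordiv n i)) :
    PySem.Int.floordiv n d = PySem.Int.floordiv n i := by
  have hk1 : 1 ≤ PySem.Int.floordiv n i := pvFdPos n i hi hin
  have hki := (PySem.Int.floordiv_eq_iff_of_pos (a := n) (b := i) hi).1 rfl
  have hdk : d * PySem.Int.floordiv n i ≤ n :=
    (PySem.Int.le_floordiv_iff_mul_le (by omega)).1 hd
  rw [PySem.Int.floordiv_eq_iff_of_pos (by omega)]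
  constructor
  · nlinarith
  · nlinarith [hki.2]

-- ---- trial-division simulation: compute_mu_on_fly = muSqfreeSign ----

theorem pvFdMulOfDvd (d i : Int) (hdvd : i ∣ d) : PySem.Int.floordiv d i * i = d := by
  have h := PySem.Int.floordiv_mul_add_mod d i
  rw [(PySem.Int.mod_eq_zero_iff_dvd d i).2 hdvd] at h
  omega

theorem pvDvdPos (d i : Int) (hi : 2 ≤ i) (hd : 1 ≤ d) (hdvd : i ∣ d) :
    1 ≤ PySem.Int.floordiv d i := by
  have h := pvFdMulOfDvd d i hdvd
  nlinarith [h]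

theorem pvNotContains (f : PySem.Dict Int Int) (x : Int) (hx : x ∉ f.keys) :
    f.contains x = false := by
  rw [Bool.eq_false_iff]
  intro hc
  exact hx ((PySem.Dict.contains_iff_mem_keys f x).1 hc)

theorem pvInnerNotDvd (i d : Int) (f : PySem.Dict Int Int) (h : ¬ i ∣ d) :
    muFlyInner i d f = (d, f) := by
  rw [muFlyInner, dif_neg]
  intro hc
  exact h ((PySem.Int.mod_eq_zero_iff_dvd d i).1 hc.2.2)

theorem pvInnerOne (i d : Int) (f : PySem.Dict Int Int) (hi : 2 ≤ i) (hd : 1 ≤ d)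
    (h1 : i ∣ d) (h2 : ¬ i ∣ PySem.Int.floordiv d i) :
    muFlyInner i d f = (PySem.Int.floordiv d i, f.modify i 0 (· + 1)) := by
  rw [muFlyInner, dif_pos ⟨hi, hd, (PySem.Int.mod_eq_zero_iff_dvd d i).2 h1⟩]
  exact pvInnerNotDvd i _ _ h2

theorem pvInnerMono (i d : Int) (f : PySem.Dict Int Int) (k : Int) :
    f.getD k 0 ≤ (muFlyInner i d f).2.getD k 0 := by
  induction d, f using muFlyInner.induct (i := i) with
  | case1 d f h ih =>
    rw [muFlyInner, dif_pos h]
    refine le_trans ?_ ih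
    rw [PySem.Dict.getD_modify]
    rcases eq_or_ne k i with rfl | hne
    · rw [if_pos rfl]; omega
    · rw [if_neg hne]
  | case2 d f h => rw [muFlyInner, dif_neg h]

theorem pvInnerKeys (i d : Int) (f : PySem.Dict Int Int) (k : Int) :
    k ∈ f.keys → k ∈ (muFlyInner i d f).2.keys := by
  induction d, f using muFlyInner.induct (i := i) with
  | case1 d f h ih =>
    intro hk
    rw [muFlyInner, dif_pos h]
    exact ih (by rw [PySem.Dict.keys_modify, PySem.Dict.mem_keys_insert]; right; exact hk)
  | case2 d f h => intro hk; rw [muFlyInner, dif_neg h]; exact hk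

theorem pvNodupModify (f : PySem.Dict Int Int) (x : Int) (g : Int → Int)
    (h : f.keys.Nodup) : (f.modify x 0 g).keys.Nodup := by
  rw [PySem.Dict.keys_modify]
  exact PySem.Dict.nodup_keys_insert f x _ h

theorem pvInnerNodup (i d : Int) (f : PySem.Dict Int Int) :
    f.keys.Nodup → (muFlyInner i d f).2.keys.Nodup := by
  induction d, f using muFlyInner.induct (i := i) with
  | case1 d f hg ih =>
    intro h
    rw [muFlyInner, dif_pos hg]
    exact ih (pvNodupModify f i _ h)
  | case2 d f hg => intro h; rw [muFlyInner, dif_neg hg]; exact h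

theorem pvKeysModifyFresh (f : PySem.Dict Int Int) (x : Int) (g : Int → Int)
    (hx : x ∉ f.keys) : (f.modify x 0 g).keys = f.keys ++ [x] := by
  rw [PySem.Dict.keys_modify, PySem.Dict.keys_insert_of_not_contains f _ (pvNotContains f x hx)]

theorem pvInnerC2 (i d : Int) (f : PySem.Dict Int Int) (hi : 2 ≤ i) (hd : 1 ≤ d)
    (h1 : i ∣ d) (h2 : i ∣ PySem.Int.floordiv d i) (h0 : 0 ≤ f.getD i 0) :
    2 ≤ (muFlyInner i d f).2.getD i 0 ∧ i ∈ (muFlyInner i d f).2.keys := by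
  have hd1 : 1 ≤ PySem.Int.floordiv d i := pvDvdPos d i hi hd h1
  rw [muFlyInner, dif_pos ⟨hi, hd, (PySem.Int.mod_eq_zero_iff_dvd d i).2 h1⟩]
  rw [muFlyInner, dif_pos ⟨hi, hd1, (PySem.Int.mod_eq_zero_iff_dvd _ i).2 h2⟩]
  set f2 := (f.modify i 0 (· + 1)).modify i 0 (· + 1) with hf2
  have hgd : 2 ≤ f2.getD i 0 := by
    rw [hf2, PySem.Dict.getD_modify, if_pos rfl, PySem.Dict.getD_modify, if_pos rfl]
    omega
  refine ⟨le_trans hgd (pvInnerMono i _ f2 i), pvInnerKeys i _ f2 i ?_⟩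
  rw [hf2, PySem.Dict.keys_modify, PySem.Dict.mem_keys_insert]
  left; rfl

def pvBad (f : PySem.Dict Int Int) : Prop := ∃ k ∈ f.keys, 2 ≤ f.getD k 0
def pvGood (f : PySem.Dict Int Int) : Prop := ∀ k ∈ f.keys, f.getD k 0 = 1
def pvSgn (f : PySem.Dict Int Int) : Int := if f.size % 2 = 1 then -1 else 1

theorem pvValuesAny (f : PySem.Dict Int Int) (hnd : f.keys.Nodup) :
    (f.values.any (fun e => decide (2 ≤ e)) = true) ↔ pvBad f := by
  rw [PySem.Dict.values_eq_map_keys f hnd 0, List.any_map, List.any_eq_true]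
  simp [pvBad]

theorem pvSizeKeys (f : PySem.Dict Int Int) : f.size = f.keys.length := by
  simp [PySem.Dict.size, PySem.Dict.keys]

theorem pvSgnFlip (f : PySem.Dict Int Int) (x : Int) (g : Int → Int) (hx : x ∉ f.keys) :
    pvSgn (f.modify x 0 g) = -pvSgn f := by
  have h : (f.modify x 0 g).size = f.size + 1 := by
    rw [pvSizeKeys, pvSizeKeys, pvKeysModifyFresh f x g hx]; simp
  unfold pvSgn
  rw [h]
  rcases Nat.mod_two_eq_zero_or_one f.size with he | ho
  · rw [if_pos (by omega), if_neg (by omega)]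
  · rw [if_neg (by omega), if_pos (by omega)]
    norm_num

theorem pvBadModify (f : PySem.Dict Int Int) (x : Int) (hb : pvBad f) :
    pvBad (f.modify x 0 (· + 1)) := by
  obtain ⟨k, hk, h2⟩ := hb
  refine ⟨k, ?_, ?_⟩
  · rw [PySem.Dict.keys_modify, PySem.Dict.mem_keys_insert]; right; exact hk
  · rw [PySem.Dict.getD_modify]
    rcases eq_or_ne k x with rfl | hne
    · rw [if_pos rfl]; omega
    · rw [if_neg hne]; exact h2

theorem pvBadMonoInner (i d : Int) (f : PySem.Dict Int Int) (hb : pvBad f) :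
    pvBad (muFlyInner i d f).2 := by
  obtain ⟨k, hk, h2⟩ := hb
  exact ⟨k, pvInnerKeys i d f k hk, le_trans h2 (pvInnerMono i d f k)⟩

theorem pvBadFinish (i d : Int) (f : PySem.Dict Int Int) :
    f.keys.Nodup → pvBad f → muFinish (muFlyOuter i d f) = 0 := by
  induction i, d, f using muFlyOuter.induct with
  | case1 i d f h r ih =>
    intro hnd hb
    rw [muFlyOuter, dif_pos h]
    exact ih (pvInnerNodup i d f hnd) (pvBadMonoInner i d f hb)
  | case2 i d f h =>
    intro hnd hb
    rw [muFlyOuter, dif_neg h]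
    unfold muFinish
    by_cases h1 : 1 < d
    · rw [if_pos h1]
      have hb2 := pvBadModify f d hb
      have hnd2 := pvNodupModify f d (· + 1) hnd
      rw [if_pos ((pvValuesAny _ hnd2).2 hb2)]
    · rw [if_neg h1, if_pos ((pvValuesAny _ hnd).2 hb)]

theorem pvGoodNotBad (f : PySem.Dict Int Int) (hg : pvGood f) : ¬ pvBad f := by
  rintro ⟨k, hk, h2⟩
  have := hg k hk
  omega

theorem pvSim (i d : Int) (f : PySem.Dict Int Int) :
    2 ≤ i → 1 ≤ d → f.keys.Nodup → (∀ k ∈ f.keys, k < i) →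
    (∀ k ∈ f.keys, ¬ k ∣ d) → pvGood f →
    muFinish (muFlyOuter i d f) = muTrialLoop i d (pvSgn f) := by
  induction i, d, f using muFlyOuter.induct with
  | case1 i d f h r ih =>
    intro hi hd hnd hlt hndvd hgood
    have hr : r = muFlyInner i d f := rfl
    rw [muFlyOuter, dif_pos h, muTrialLoop, dif_pos h]
    have hinotin : i ∉ f.keys := fun hk => absurd (hlt i hk) (lt_irrefl i)
    by_cases hdvd : i ∣ d
    · rw [if_pos ((PySem.Int.mod_eq_zero_iff_dvd d i).2 hdvd)]
      have hq1 : 1 ≤ PySem.Int.floordiv d i := pvDvdPos d i h.1 hd hdvd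
      by_cases h2 : i ∣ PySem.Int.floordiv d i
      · -- repeated prime factor: A's dict carries a value ≥ 2 ever after, B returns 0
        rw [if_pos ((PySem.Int.mod_eq_zero_iff_dvd _ i).2 h2)]
        have h0 : f.getD i 0 = 0 :=
          PySem.Dict.getD_of_not_contains f 0 (pvNotContains f i hinotin)
        obtain ⟨hge2, hmem⟩ := pvInnerC2 i d f h.1 hd hdvd h2 (by omega)
        exact pvBadFinish (i + 1) _ _ (pvInnerNodup i d f hnd) ⟨i, hmem, hge2⟩
      · -- exactly one factor i: both sides advance in lock step
        rw [if_neg (fun hc => h2 ((PySem.Int.mod_eq_zero_iff_dvd _ i).1 hc))]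
        rw [pvInnerOne i d f h.1 hd hdvd h2] at hr ⊢
        rw [hr] at ih
        dsimp only at ih ⊢
        have hkeys : (f.modify i 0 (· + 1)).keys = f.keys ++ [i] :=
          pvKeysModifyFresh f i _ hinotin
        have hqdvd : PySem.Int.floordiv d i ∣ d := ⟨i, (pvFdMulOfDvd d i hdvd).symm⟩
        have hrec := ih (by omega) hq1 (pvNodupModify f i _ hnd)
          (by rw [hkeys]; intro k hk
              rcases List.mem_append.1 hk with hk | hk
              · exact lt_trans (hlt k hk) (by omega)
              · simp at hk; omega)
          (by rw [hkeys]; intro k hk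
              rcases List.mem_append.1 hk with hk | hk
              · exact fun hc => hndvd k hk (dvd_trans hc hqdvd)
              · simp at hk; subst hk; exact h2)
          (by intro k hk
              rw [hkeys] at hk
              rw [PySem.Dict.getD_modify]
              rcases List.mem_append.1 hk with hk | hk
              · rw [if_neg (show ¬ k = i from fun hc => hinotin (hc ▸ hk))]
                exact hgood k hk
              · simp at hk; subst hk
                rw [if_pos rfl,
                  PySem.Dict.getD_of_not_contains f 0 (pvNotContains f k hinotin)]
                norm_num)
        rw [hrec, pvSgnFlip f i _ hinotin]
    · rw [if_neg (fun hc => hdvd ((PySem.Int.mod_eq_zero_iff_dvd d i).1 hc))]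
      rw [pvInnerNotDvd i d f hdvd] at hr ⊢
      rw [hr] at ih
      dsimp only at ih ⊢
      exact ih (by omega) hd hnd
        (fun k hk => lt_trans (hlt k hk) (by omega)) hndvd hgood
  | case2 i d f h =>
    intro hi hd hnd hlt hndvd hgood
    rw [muFlyOuter, dif_neg h, muTrialLoop, dif_neg h]
    unfold muFinish
    dsimp only
    by_cases h1 : 1 < d
    · rw [if_pos h1, if_pos h1]
      have hdnotin : d ∉ f.keys := fun hk => hndvd d hk (dvd_refl d)
      have hkeys := pvKeysModifyFresh f d (· + 1) hdnotin
      have hnd2 := pvNodupModify f d (· + 1) hnd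
      have hgood2 : pvGood (f.modify d 0 (· + 1)) := by
        intro k hk
        rw [hkeys] at hk
        rw [PySem.Dict.getD_modify]
        rcases List.mem_append.1 hk with hk | hk
        · rw [if_neg (show ¬ k = d from fun hc => hdnotin (hc ▸ hk))]
          exact hgood k hk
        · simp at hk; subst hk
          rw [if_pos rfl, PySem.Dict.getD_of_not_contains f 0 (pvNotContains f k hdnotin)]
          norm_num
      rw [if_neg (by
        rw [Bool.not_eq_true, Bool.eq_false_iff]
        exact fun hc => (pvGoodNotBad _ hgood2) ((pvValuesAny _ hnd2).1 hc))]
      have hflip := pvSgnFlip f d (· + 1) hdnotin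
      unfold pvSgn at hflip ⊢
      rcases Nat.mod_two_eq_zero_or_one (f.modify d 0 (· + 1)).size with he | ho
      · rw [if_neg (by omega)]
        rw [if_neg (by omega)] at hflip
        omega
      · rw [if_pos (by omega)]
        rw [if_pos (by omega)] at hflip
        omega
    · rw [if_neg h1, if_neg h1]
      rw [if_neg (by
        rw [Bool.not_eq_true, Bool.eq_false_iff]
        exact fun hc => (pvGoodNotBad f hgood) ((pvValuesAny f hnd).1 hc))]
      rfl

theorem pvFlyEqTrial (d : Int) (hd : 2 ≤ d) : compute_mu_on_fly d = muSqfreeSign d := by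
  rw [compute_mu_on_fly, if_neg (by omega), muSqfreeSign, if_neg (by omega)]
  have hsim := pvSim 2 d PySem.Dict.empty (le_refl 2) (by omega) PySem.Dict.nodup_keys_empty
    (by intro k hk; rw [PySem.Dict.keys_empty] at hk; cases hk)
    (by intro k hk; rw [PySem.Dict.keys_empty] at hk; cases hk)
    (by intro k hk; rw [PySem.Dict.keys_empty] at hk; cases hk)
  rw [hsim]
  have hsgn : pvSgn PySem.Dict.empty = 1 := by
    unfold pvSgn; rw [PySem.Dict.size_empty]; norm_num
  rw [hsgn]

-- ---- the prefix-sum array of A, read at its last index ----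

theorem pvGetDSet (l : List Int) (i : Nat) (a : Int) (h : i < l.length) :
    (l.set i a).getD i 0 = a := by
  simp [List.getD_eq_getElem?_getD, h]

theorem pvSetFoldLen (mu : List Int) (l : List Int) (init : List Int) :
    (l.foldl (fun pre i => pre.set i.toNat (pre.getD (i - 1).toNat 0 + mu.getD i.toNat 0))
      init).length = init.length := by
  induction l generalizing init with
  | nil => rfl
  | cons x t ih => rw [List.foldl_cons, ih, List.length_set]

theorem pvPrefix (mu : List Int) (L : Int) (hL : 0 ≤ L) (m : Int) (hm : 0 ≤ m) :
    m ≤ L →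
    ((PySem.List.pyRange 1 (m + 1) 1).foldl
        (fun pre i => pre.set i.toNat (pre.getD (i - 1).toNat 0 + mu.getD i.toNat 0))
        (List.replicate (L + 1).toNat 0)).getD m.toNat 0
      = ((PySem.List.pyRange 1 (m + 1) 1).map (fun d => mu.getD d.toNat 0)).sum := by
  induction m, hm using Int.le_induction with
  | base =>
    intro _
    rw [PySem.List.pyRange_one_eq_nil (by omega)]
    simp
  | succ n hn ih =>
    intro hle
    rw [PySem.List.pyRange_one_succ_right (by omega : (1:Int) ≤ n + 1)]
    rw [List.foldl_append, List.foldl_cons, List.foldl_nil]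
    have hlen : ((PySem.List.pyRange 1 (n + 1) 1).foldl
        (fun pre i => pre.set i.toNat (pre.getD (i - 1).toNat 0 + mu.getD i.toNat 0))
        (List.replicate (L + 1).toNat 0)).length = (L + 1).toNat := by
      rw [pvSetFoldLen, List.length_replicate]
    rw [pvGetDSet _ _ _ (by rw [hlen]; omega)]
    have hsub : ((n:Int) + 1 - 1).toNat = n.toNat := by omega
    rw [hsub, ih (by omega)]
    rw [List.map_append, List.sum_append]
    simp

-- ---- the block loop of A enumerates d = i, i+1, …, n ----

theorem pvBlock (n : Int) : ∀ (N : Nat) (i acc : Int), (n + 1 - i).toNat ≤ N → 1 ≤ i →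
    blockLoop n i acc = acc + ((PySem.List.pyRange i (n + 1) 1).map
      (fun d => compute_mu_on_fly d * (PySem.Int.floordiv n d + 1) ^ 3)).sum := by
  intro N
  induction N with
  | zero =>
    intro i acc hN h1
    rw [blockLoop, dif_neg (fun hc => by omega)]
    rw [PySem.List.pyRange_one_eq_nil (by omega)]
    simp
  | succ N ih =>
    intro i acc hN h1
    by_cases hin : i ≤ n
    · rw [blockLoop, dif_pos ⟨h1, hin⟩]
      dsimp only
      set k := PySem.Int.floordiv n i with hk
      set j := PySem.Int.floordiv n k with hj
      have hk1 : 1 ≤ k := pvFdPos n i (by omega) hin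
      have hij : i ≤ j := by rw [hj, hk]; exact pvLeFdFd n i (by omega) hin
      have hjn : j ≤ n := by rw [hj]; exact pvFdLeSelf n k (by omega) (by omega)
      rw [min_eq_left hjn, PySem.List.foldl_add]
      rw [ih (j + 1) _ (by omega) (by omega)]
      have hcongr : (PySem.List.pyRange i (j + 1) 1).map
            (fun d => compute_mu_on_fly d * (k + 1) ^ 3)
          = (PySem.List.pyRange i (j + 1) 1).map
            (fun d => compute_mu_on_fly d * (PySem.Int.floordiv n d + 1) ^ 3) :=
        List.map_congr_left (fun d hd => by
          have h1d := (PySem.List.mem_pyRange_one.1 hd).1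
          have h2d := (PySem.List.mem_pyRange_one.1 hd).2
          rw [hj, hk] at h2d
          rw [hk, ← pvFdBlock n i d (by omega) hin h1d (by omega)])
      rw [hcongr]
      rw [PySem.List.pyRange_one_append i (j + 1) (n + 1) (by omega) (by omega),
        List.map_append, List.sum_append, add_assoc]
    · rw [blockLoop, dif_neg (fun hc => hin hc.2)]
      rw [PySem.List.pyRange_one_eq_nil (by omega)]
      simp

-- ===== VERDICT (by name: the statement is the Claim_ definition above) =====
theorem compute_d_optimized_spec : Claim_equal_compute_d_optimized := by
  unfold Claim_equal_compute_d_optimized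
  intro n _ hpre
  unfold Spec_compute_d_optimized
  have hpre' : (1:Int) ≤ n := hpre
  rw [compute_d_optimized, compute_d_optimized_alt]
  dsimp only
  set L := min (2 * 10 ^ 6) n with hLdef
  have hL1 : 1 ≤ L := le_min (by norm_num) hpre'
  have hLn : L ≤ n := min_le_right _ _
  have hmin : min L n = L := min_eq_left hLn
  rw [hmin]
  set mu := sieveMobius L with hmu
  -- every plain accumulation loop is a sum; B's single loop splits at the sieve limit
  simp only [PySem.List.foldl_add]
  rw [PySem.List.pyRange_one_append 1 (L + 1) (n + 1) (by omega) (by omega),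
    List.map_append, List.sum_append]
  have hB1 : (PySem.List.pyRange 1 (L + 1) 1).map
        (fun d => (if d ≤ L then mu.getD d.toNat 0 else muSqfreeSign d) *
          ((PySem.Int.floordiv n d + 1) ^ 3 - 1))
      = (PySem.List.pyRange 1 (L + 1) 1).map
        (fun d => mu.getD d.toNat 0 * (PySem.Int.floordiv n d + 1) ^ 3 - mu.getD d.toNat 0) :=
    List.map_congr_left (fun d hd => by
      have h2d := (PySem.List.mem_pyRange_one.1 hd).2
      rw [if_pos (by omega : d ≤ L)]
      ring)
  have hB2 : (PySem.List.pyRange (L + 1) (n + 1) 1).map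
        (fun d => (if d ≤ L then mu.getD d.toNat 0 else muSqfreeSign d) *
          ((PySem.Int.floordiv n d + 1) ^ 3 - 1))
      = (PySem.List.pyRange (L + 1) (n + 1) 1).map
        (fun d => compute_mu_on_fly d * (PySem.Int.floordiv n d + 1) ^ 3 - compute_mu_on_fly d) :=
    List.map_congr_left (fun d hd => by
      have h1d := (PySem.List.mem_pyRange_one.1 hd).1
      rw [if_neg (by omega : ¬ d ≤ L), ← pvFlyEqTrial d (by omega)]
      ring)
  rw [hB1, hB2, pvSumMapSub, pvSumMapSub]
  -- A: prefix array read at L is the Mertens sum; the block loop is the tail sum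
  rw [pvPrefix mu L (by omega) L (by omega) le_rfl]
  by_cases hc : L < n
  · rw [if_pos hc, if_pos hc]
    rw [pvBlock n (n + 1 - (L + 1)).toNat (L + 1) _ le_rfl (by omega)]
    ring
  · have hn : n + 1 ≤ L + 1 := by omega
    rw [if_neg hc, if_neg hc]
    rw [PySem.List.pyRange_one_eq_nil hn]
    simp
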